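-- pv_equiv track=rewrite | github.com/mareksubocz/QuantumJSP | proba.py | operationOrder
-- ===== SOURCE A (Python) =====
-- def operationOrder(X, P):  # Constraints (5)
--     Eall = 0
--     for j in range(len(X)):
--         for i in range(len(X[j]) - 1):
--             for i2 in range(i + 1, len(X[j])):
--                 for t in range(len(X[j][i])):
--                     for t2 in range(t, t + P[j][i]):
--                         Eall += X[j][i][t] * X[j][i2][t2]
--     return Eall
-- ===== SOURCE B (Python) =====
-- def operationOrder(X, P):
--     total = 0
--     for j in range(len(X)):
--         job = X[j]
--         for i2 in range(1, len(job)):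
--             row = job[i2]
--             T2 = len(row)
--             pre = [0]
--             acc = 0
--             for v in row:
--                 acc += v
--                 pre.append(acc)
--             for i in range(i2):
--                 op = job[i]
--                 if len(op) == 0:
--                     continue
--                 p = P[j][i]
--                 if p <= 0:
--                     continue
--                 s = 0
--                 for t in range(len(op)):
--                     s += op[t] * (pre[min(t + p, T2)] - pre[min(t, T2)])
--                 total += s
--     return total
-- ===== Notes on version B (the rewrite author's own statement) =====
-- stated objective: faster
-- what changed: Replaces the innermost O(P) scan over each time window by an O(1) prefix-sum difference (prefix sums built once per later operation), and iterates pairs as (i2, i<i2) instead of (i, i2>i).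
import Mathlib
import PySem

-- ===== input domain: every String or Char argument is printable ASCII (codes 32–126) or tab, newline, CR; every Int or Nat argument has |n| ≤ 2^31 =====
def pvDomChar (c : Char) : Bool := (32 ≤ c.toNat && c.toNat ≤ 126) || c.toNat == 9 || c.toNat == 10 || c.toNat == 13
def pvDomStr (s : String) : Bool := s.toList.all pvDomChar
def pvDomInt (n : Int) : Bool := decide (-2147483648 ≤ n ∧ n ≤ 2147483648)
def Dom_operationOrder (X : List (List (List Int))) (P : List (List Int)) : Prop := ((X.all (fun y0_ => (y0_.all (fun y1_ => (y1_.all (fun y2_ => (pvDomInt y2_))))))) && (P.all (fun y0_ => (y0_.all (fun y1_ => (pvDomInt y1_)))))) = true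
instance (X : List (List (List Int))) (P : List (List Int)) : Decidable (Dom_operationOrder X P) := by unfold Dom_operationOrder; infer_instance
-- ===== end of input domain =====

-- B replaces A's innermost scan over each time window by a prefix-sum difference
-- (prefix sums built once per later operation), iterating the pairs as (i2, i < i2).

-- ===== PORT A =====
-- Literal port of A: five nested loops; X[j][i2][t2] may be out of range in Python
-- (IndexError, excluded by Pre_), ported with pyGetD whose default is never used inside Pre_.
def operationOrder (X : List (List (List Int))) (P : List (List Int)) : Int :=
  (List.range X.length).foldl (fun Eall j =>
    (List.range ((X.getD j []).length - 1)).foldl (fun Eall i =>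
      (List.range' (i + 1) ((X.getD j []).length - (i + 1))).foldl (fun Eall i2 =>
        (List.range ((X.getD j []).getD i []).length).foldl (fun Eall (t : Nat) =>
          (PySem.List.pyRange (t : Int) ((t : Int) + (P.getD j []).getD i 0) 1).foldl (fun Eall t2 =>
            Eall + ((X.getD j []).getD i []).getD t 0 * PySem.List.pyGetD ((X.getD j []).getD i2 []) t2 0)
            Eall) Eall) Eall) Eall) 0

-- ===== PORT B =====
-- prefix sums of row:  pre = [0]; acc = 0; for v in row: acc += v; pre.append(acc)
def pvPrefix (row : List Int) : List Int :=
  (row.foldl (fun acc v => (acc.1 ++ [acc.2 + v], acc.2 + v)) (([0] : List Int), (0 : Int))).1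

-- Port of B (Source B): min (t + p) T2 is computed on naturals; it sits inside the branch
-- 0 < p, where t + p.toNat equals the Python int t + p.
def operationOrder_alt (X : List (List (List Int))) (P : List (List Int)) : Int :=
  (List.range X.length).foldl (fun total j =>
    let job := X.getD j []
    (List.range' 1 (job.length - 1)).foldl (fun total i2 =>
      let row := job.getD i2 []
      let T2 := row.length
      let pre := pvPrefix row
      (List.range i2).foldl (fun total i =>
        let op := job.getD i []
        if op.length = 0 then total
        else
          let p := (P.getD j []).getD i 0
          if p ≤ 0 then total
          else
            total + (List.range op.length).foldl (fun s t =>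
              s + op.getD t 0 * (pre.getD (min (t + p.toNat) T2) 0 - pre.getD (min t T2) 0)) 0)
        total) total) 0

-- ===== PRECONDITION & SPEC =====
-- Pre_ is exactly the set of inputs on which the Python A returns (no IndexError): whenever
-- the t-loop of a pair (i, i2) runs, P[j][i] must exist and every window index
-- t2 < t + P[j][i] must be inside X[j][i2].
def Pre_operationOrder (X : List (List (List Int))) (P : List (List Int)) : Prop :=
  ∀ j ∈ List.range X.length, ∀ i ∈ List.range ((X.getD j []).length - 1),
    (0 < ((X.getD j []).getD i []).length → j < P.length ∧ i < (P.getD j []).length) ∧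
    ∀ i2 ∈ List.range (X.getD j []).length, i < i2 →
      ∀ t ∈ List.range ((X.getD j []).getD i []).length,
        0 < (P.getD j []).getD i 0 →
        (t : Int) + (P.getD j []).getD i 0 ≤ (((X.getD j []).getD i2 []).length : Int)
instance (X : List (List (List Int))) (P : List (List Int)) : Decidable (Pre_operationOrder X P) := by
  unfold Pre_operationOrder; infer_instance

def pvWitness_operationOrder : List (List (List Int)) × List (List Int) :=
  ([[[1, 1], [1, 0]]], [[1, 1]])

def Spec_operationOrder (X : List (List (List Int))) (P : List (List Int)) (out : Int) : Prop := out = operationOrder_alt X P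
instance (X : List (List (List Int))) (P : List (List Int)) (out : Int) : Decidable (Spec_operationOrder X P out) := by unfold Spec_operationOrder; infer_instance

-- ===== CLAIM (what is proved, stated in full; the proofs are below) =====
def Claim_equal_operationOrder : Prop := ∀ (X : List (List (List Int))) (P : List (List Int)), Dom_operationOrder X P → Pre_operationOrder X P → Spec_operationOrder X P (operationOrder X P)

-- ===== LEMMAS AND PROOFS =====

-- A foldl that adds f x at every step, up to congruence on the list.
theorem pvFoldlAdd {α : Type} (l : List α) (f : α → Int) (E : Int)
    (F : Int → α → Int) (h : ∀ E x, x ∈ l → F E x = E + f x) :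
    l.foldl F E = E + (l.map f).sum := by
  induction l generalizing E with
  | nil => simp
  | cons x xs ih =>
    rw [List.foldl_cons, h E x List.mem_cons_self,
      ih (E + f x) (fun E y hy => h E y (List.mem_cons_of_mem x hy))]
    simp only [List.map_cons, List.sum_cons]
    ring

-- running prefix sums, as a recursive function
def pvPreList (s : Int) : List Int → List Int
  | [] => []
  | v :: r => (s + v) :: pvPreList (s + v) r

theorem pvPrefix_foldl (row : List Int) (a : List Int) (s : Int) :
    row.foldl (fun acc v => (acc.1 ++ [acc.2 + v], acc.2 + v)) (a, s)
      = (a ++ pvPreList s row, s + row.sum) := by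
  induction row generalizing a s with
  | nil => simp [pvPreList]
  | cons v r ih => simp [pvPreList, ih, List.append_assoc]; ring

theorem pvPrefix_eq (row : List Int) : pvPrefix row = 0 :: pvPreList 0 row := by
  simp [pvPrefix, pvPrefix_foldl]

theorem pvPreList_getD (row : List Int) (s : Int) (k : Nat) (hk : k < row.length) :
    (pvPreList s row).getD k 0 = s + (row.take (k + 1)).sum := by
  induction row generalizing s k with
  | nil => simp at hk
  | cons v r ih =>
    cases k with
    | zero => simp [pvPreList]
    | succ k =>
      simp only [pvPreList, List.getD_cons_succ, List.take_succ_cons, List.sum_cons]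
      rw [ih (s + v) k (by simpa using hk)]
      ring

theorem pvPrefix_getD (row : List Int) (k : Nat) (hk : k ≤ row.length) :
    (pvPrefix row).getD k 0 = (row.take k).sum := by
  rw [pvPrefix_eq]
  cases k with
  | zero => simp
  | succ k =>
    rw [List.getD_cons_succ, pvPreList_getD row 0 k (by omega)]
    ring

theorem pvTakeSuccSum (row : List Int) (k : Nat) (hk : k < row.length) :
    (row.take (k + 1)).sum = (row.take k).sum + row.getD k 0 := by
  rw [List.take_add_one, List.sum_append, List.getElem?_eq_getElem hk]
  simp [List.getD_eq_getElem?_getD, List.getElem?_eq_getElem hk]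

theorem pvWindow (row : List Int) (lo n : Nat) (h : lo + n ≤ row.length) :
    ((List.range n).map (fun k => row.getD (lo + k) 0)).sum
      = (row.take (lo + n)).sum - (row.take lo).sum := by
  induction n with
  | zero => simp
  | succ n ih =>
    rw [List.range_succ, List.map_append, List.sum_append, ih (by omega),
      show lo + (n + 1) = (lo + n) + 1 by omega,
      pvTakeSuccSum row (lo + n) (by omega)]
    simp only [List.map_cons, List.map_nil, List.sum_cons, List.sum_nil]
    ring

-- window sum over a pyRange, as a difference of take-sums
theorem pvPyWindow (row : List Int) (c : Int) (t n : Nat) (h : t + n ≤ row.length) :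
    ((PySem.List.pyRange (t : Int) ((t : Int) + (n : Int)) 1).map
      (fun t2 => c * PySem.List.pyGetD row t2 0)).sum
      = c * ((row.take (t + n)).sum - (row.take t).sum) := by
  rw [PySem.List.pyRange_one]
  have h1 : (((t : Int) + (n : Int)) - (t : Int)).toNat = n := by omega
  rw [h1, List.map_map]
  have h2 : ((List.range n).map ((fun t2 => c * PySem.List.pyGetD row t2 0) ∘ fun k : Nat => (t : Int) + k))
      = (List.range n).map (fun k => c * row.getD (t + k) 0) := by
    refine List.map_congr_left (fun k _ => ?_)
    simp only [Function.comp]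
    rw [show (t : Int) + (k : Int) = ((t + k : Nat) : Int) by push_cast; ring,
      PySem.List.pyGetD_natCast]
  rw [h2, List.sum_map_mul_left, pvWindow row t n h]

-- the two innermost loops of A over the pair (i, i2), as a nested sum
def pvFA (X : List (List (List Int))) (P : List (List Int)) (j i i2 : Nat) : Int :=
  ((List.range ((X.getD j []).getD i []).length).map (fun t : Nat =>
    ((PySem.List.pyRange (t : Int) ((t : Int) + (P.getD j []).getD i 0) 1).map (fun t2 =>
      ((X.getD j []).getD i []).getD t 0
        * PySem.List.pyGetD ((X.getD j []).getD i2 []) t2 0)).sum)).sum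

-- the contribution of the pair (i, i2) in B
def pvFB (X : List (List (List Int))) (P : List (List Int)) (j i i2 : Nat) : Int :=
  let job := X.getD j []
  let row := job.getD i2 []
  let op := job.getD i []
  if op.length = 0 then 0
  else
    let p := (P.getD j []).getD i 0
    if p ≤ 0 then 0
    else
      (List.range op.length).foldl (fun s t =>
        s + op.getD t 0 * ((pvPrefix row).getD (min (t + p.toNat) row.length) 0
          - (pvPrefix row).getD (min t row.length) 0)) 0

theorem pvLvlAt (X : List (List (List Int))) (P : List (List Int)) (j i i2 : Nat) (E : Int) :
    (List.range ((X.getD j []).getD i []).length).foldl (fun Eall (t : Nat) =>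
      (PySem.List.pyRange (t : Int) ((t : Int) + (P.getD j []).getD i 0) 1).foldl (fun Eall t2 =>
        Eall + ((X.getD j []).getD i []).getD t 0
          * PySem.List.pyGetD ((X.getD j []).getD i2 []) t2 0) Eall) E
      = E + pvFA X P j i i2 := by
  simp only [pvFA]
  exact pvFoldlAdd _ _ _ _ (fun E t _ => PySem.List.foldl_add _ _ _)

theorem pvLvlAi2 (X : List (List (List Int))) (P : List (List Int)) (j i : Nat) (E : Int) :
    (List.range' (i + 1) ((X.getD j []).length - (i + 1))).foldl (fun Eall i2 =>
      (List.range ((X.getD j []).getD i []).length).foldl (fun Eall (t : Nat) =>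
        (PySem.List.pyRange (t : Int) ((t : Int) + (P.getD j []).getD i 0) 1).foldl (fun Eall t2 =>
          Eall + ((X.getD j []).getD i []).getD t 0
            * PySem.List.pyGetD ((X.getD j []).getD i2 []) t2 0) Eall) Eall) E
      = E + ((List.range' (i + 1) ((X.getD j []).length - (i + 1))).map
          (fun i2 => pvFA X P j i i2)).sum :=
  pvFoldlAdd _ _ _ _ (fun E i2 _ => pvLvlAt X P j i i2 E)

theorem pvLvlAi (X : List (List (List Int))) (P : List (List Int)) (j : Nat) (E : Int) :
    (List.range ((X.getD j []).length - 1)).foldl (fun Eall i =>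
      (List.range' (i + 1) ((X.getD j []).length - (i + 1))).foldl (fun Eall i2 =>
        (List.range ((X.getD j []).getD i []).length).foldl (fun Eall (t : Nat) =>
          (PySem.List.pyRange (t : Int) ((t : Int) + (P.getD j []).getD i 0) 1).foldl (fun Eall t2 =>
            Eall + ((X.getD j []).getD i []).getD t 0
              * PySem.List.pyGetD ((X.getD j []).getD i2 []) t2 0) Eall) Eall) Eall) E
      = E + ((List.range ((X.getD j []).length - 1)).map (fun i =>
          ((List.range' (i + 1) ((X.getD j []).length - (i + 1))).map
            (fun i2 => pvFA X P j i i2)).sum)).sum :=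
  pvFoldlAdd _ _ _ _ (fun E i _ => pvLvlAi2 X P j i E)

theorem pvOpAEq (X : List (List (List Int))) (P : List (List Int)) :
    operationOrder X P
      = ((List.range X.length).map (fun j =>
          ((List.range ((X.getD j []).length - 1)).map (fun i =>
            ((List.range' (i + 1) ((X.getD j []).length - (i + 1))).map (fun i2 =>
              pvFA X P j i i2)).sum)).sum)).sum := by
  unfold operationOrder
  rw [pvFoldlAdd _ _ _ _ (fun E j _ => pvLvlAi X P j E)]
  exact Int.zero_add _

theorem pvLvlBi (X : List (List (List Int))) (P : List (List Int)) (j i2 : Nat) (E : Int) :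
    (List.range i2).foldl (fun total i =>
      if ((X.getD j []).getD i []).length = 0 then total
      else
        if (P.getD j []).getD i 0 ≤ 0 then total
        else
          total + (List.range ((X.getD j []).getD i []).length).foldl (fun s t =>
            s + ((X.getD j []).getD i []).getD t 0
              * ((pvPrefix ((X.getD j []).getD i2 [])).getD
                    (min (t + ((P.getD j []).getD i 0).toNat) ((X.getD j []).getD i2 []).length) 0
                - (pvPrefix ((X.getD j []).getD i2 [])).getD
                    (min t ((X.getD j []).getD i2 []).length) 0)) 0) E
      = E + ((List.range i2).map (fun i => pvFB X P j i i2)).sum := by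
  refine pvFoldlAdd _ _ _ _ (fun E i _ => ?_)
  simp only [pvFB]
  split_ifs with h1 h2
  · exact (add_zero E).symm
  · exact (add_zero E).symm
  · rfl

theorem pvLvlBi2 (X : List (List (List Int))) (P : List (List Int)) (j : Nat) (E : Int) :
    (List.range' 1 ((X.getD j []).length - 1)).foldl (fun total i2 =>
      (List.range i2).foldl (fun total i =>
        if ((X.getD j []).getD i []).length = 0 then total
        else
          if (P.getD j []).getD i 0 ≤ 0 then total
          else
            total + (List.range ((X.getD j []).getD i []).length).foldl (fun s t =>
              s + ((X.getD j []).getD i []).getD t 0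
                * ((pvPrefix ((X.getD j []).getD i2 [])).getD
                      (min (t + ((P.getD j []).getD i 0).toNat) ((X.getD j []).getD i2 []).length) 0
                  - (pvPrefix ((X.getD j []).getD i2 [])).getD
                      (min t ((X.getD j []).getD i2 []).length) 0)) 0) total) E
      = E + ((List.range' 1 ((X.getD j []).length - 1)).map (fun i2 =>
          ((List.range i2).map (fun i => pvFB X P j i i2)).sum)).sum :=
  pvFoldlAdd _ _ _ _ (fun E i2 _ => pvLvlBi X P j i2 E)

theorem pvOpBEq (X : List (List (List Int))) (P : List (List Int)) :
    operationOrder_alt X P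
      = ((List.range X.length).map (fun j =>
          ((List.range' 1 ((X.getD j []).length - 1)).map (fun i2 =>
            ((List.range i2).map (fun i => pvFB X P j i i2)).sum)).sum)).sum := by
  simp only [operationOrder_alt]
  rw [pvFoldlAdd _ _ _ _ (fun E j _ => pvLvlBi2 X P j E)]
  exact Int.zero_add _

-- sum over a range', as a Finset.Ico sum
theorem pvRangeSum' (a n : Nat) (f : Nat → Int) :
    ((List.range' a n).map f).sum = ∑ i ∈ Finset.Ico a (a + n), f i := by
  rw [List.range'_eq_map_range, List.map_map, Finset.sum_Ico_eq_sum_range]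
  simp only [Nat.add_sub_cancel_left, Function.comp_def]
  rfl

-- triangle swap: summing over the pairs i < i2 < L in either order
theorem pvTriangle (L : Nat) (g : Nat → Nat → Int) :
    ((List.range (L - 1)).map (fun i =>
      ((List.range' (i + 1) (L - (i + 1))).map (fun i2 => g i i2)).sum)).sum
      = ((List.range' 1 (L - 1)).map (fun i2 =>
          ((List.range i2).map (fun i => g i i2)).sum)).sum := by
  have hL : ∀ i : Nat, i < L - 1 → (i + 1) + (L - (i + 1)) = L := by omega
  have l1 : ((List.range (L - 1)).map (fun i =>
      ((List.range' (i + 1) (L - (i + 1))).map (fun i2 => g i i2)).sum)).sum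
      = ∑ i ∈ Finset.range (L - 1), ∑ i2 ∈ Finset.Ico (i + 1) L, g i i2 := by
    rw [show ((List.range (L - 1)).map (fun i =>
        ((List.range' (i + 1) (L - (i + 1))).map (fun i2 => g i i2)).sum)).sum
        = ∑ i ∈ Finset.range (L - 1),
            ((List.range' (i + 1) (L - (i + 1))).map (fun i2 => g i i2)).sum from rfl]
    refine Finset.sum_congr rfl (fun i hi => ?_)
    rw [Finset.mem_range] at hi
    rw [pvRangeSum', hL i hi]
  have l2 : ((List.range' 1 (L - 1)).map (fun i2 =>
      ((List.range i2).map (fun i => g i i2)).sum)).sum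
      = ∑ i2 ∈ Finset.Ico 1 L, ∑ i ∈ Finset.range i2, g i i2 := by
    rw [pvRangeSum']
    rcases Nat.eq_zero_or_pos L with h0 | h0
    · subst h0; rfl
    · rw [show 1 + (L - 1) = L by omega]
      exact Finset.sum_congr rfl (fun i2 _ => rfl)
  rw [l1, l2]
  refine Finset.sum_comm' (fun i i2 => ?_)
  simp only [Finset.mem_range, Finset.mem_Ico]
  omega

-- on Pre_, the contribution of each pair (i, i2) is the same in A and B
theorem pvPairEq (X : List (List (List Int))) (P : List (List Int))
    (hPre : Pre_operationOrder X P) (j i i2 : Nat)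
    (hj : j < X.length) (hii2 : i < i2) (hi2 : i2 < (X.getD j []).length) :
    pvFA X P j i i2 = pvFB X P j i i2 := by
  simp only [pvFA, pvFB]
  by_cases hop : ((X.getD j []).getD i []).length = 0
  · rw [if_pos hop, hop]
    simp
  · rw [if_neg hop]
    by_cases hp : (P.getD j []).getD i 0 ≤ 0
    · rw [if_pos hp]
      refine List.sum_eq_zero (fun x hx => ?_)
      rw [List.mem_map] at hx
      obtain ⟨t, -, rfl⟩ := hx
      rw [PySem.List.pyRange_one_eq_nil (by omega : (t : Int) + (P.getD j []).getD i 0 ≤ (t : Int))]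
      rfl
    · rw [if_neg hp]
      rw [not_le] at hp
      obtain ⟨n, hn⟩ : ∃ n : Nat, (P.getD j []).getD i 0 = (n : Int) :=
        ⟨((P.getD j []).getD i 0).toNat, (Int.toNat_of_nonneg hp.le).symm⟩
      rw [hn] at hp ⊢
      rw [PySem.List.foldl_add, Int.zero_add]
      refine congrArg List.sum (List.map_congr_left (fun t ht => ?_))
      rw [List.mem_range] at ht
      have hb := ((hPre j (List.mem_range.mpr hj) i (List.mem_range.mpr (by omega))).2
        i2 (List.mem_range.mpr hi2) hii2 t (List.mem_range.mpr ht))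
      rw [hn] at hb
      have hbound := hb (by exact_mod_cast hp)
      have htn : t + n ≤ ((X.getD j []).getD i2 []).length := by
        have := hbound
        omega
      have hn1 : 0 < n := by exact_mod_cast hp
      rw [Int.toNat_natCast,
        Nat.min_eq_left htn, Nat.min_eq_left (by omega),
        pvPrefix_getD _ _ htn, pvPrefix_getD _ _ (by omega),
        pvPyWindow _ _ _ _ htn]

-- ===== VERDICT (by name: the statement is the Claim_ definition above) =====
theorem operationOrder_spec : Claim_equal_operationOrder := by
  intro X P _hDom hPre
  unfold Spec_operationOrder
  rw [pvOpAEq, pvOpBEq]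
  refine congrArg List.sum (List.map_congr_left (fun j hj => ?_))
  rw [List.mem_range] at hj
  rw [pvTriangle ((X.getD j []).length) (fun i i2 => pvFA X P j i i2)]
  refine congrArg List.sum (List.map_congr_left (fun i2 hi2 => ?_))
  rw [List.mem_range'_1] at hi2
  refine congrArg List.sum (List.map_congr_left (fun i hi => ?_))
  rw [List.mem_range] at hi
  exact pvPairEq X P hPre j i i2 hj hi (by omega)
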